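-- pv_equiv track=rewrite | github.com/russellmiller49/proc_suite_deploy | app/registry/aggregation/locks.py | _parent_pointers
-- ===== SOURCE A (Python) =====
-- def _parent_pointers(pointer: str) -> list[str]:
--     if not pointer or pointer == "/":
--         return ["/"]
--     parts = [part for part in pointer.split("/") if part]
--     parents: list[str] = []
--     for idx in range(len(parts), -1, -1):
--         if idx == 0:
--             parents.append("/")
--         else:
--             parents.append("/" + "/".join(parts[:idx]))
--     return parents
-- ===== SOURCE B (Python) =====
-- def _parent_pointers(pointer: str) -> list[str]:
--     chain: list[str] = []
--     cur = ""
--     for part in pointer.split("/"):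
--         if part:
--             cur = cur + "/" + part
--             chain.append(cur)
--     chain.reverse()
--     chain.append("/")
--     return chain
-- ===== Notes on version B (the rewrite author's own statement) =====
-- stated objective: simpler
-- what changed: A walks indices len(parts)..0 downwards, re-slicing and re-joining the parts list at every step behind a special-case guard for trivial pointers; B makes one forward pass growing an accumulator string, collecting prefixes short-to-long, then reverses and appends the root pointer, with no guard needed.
import Mathlib
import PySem

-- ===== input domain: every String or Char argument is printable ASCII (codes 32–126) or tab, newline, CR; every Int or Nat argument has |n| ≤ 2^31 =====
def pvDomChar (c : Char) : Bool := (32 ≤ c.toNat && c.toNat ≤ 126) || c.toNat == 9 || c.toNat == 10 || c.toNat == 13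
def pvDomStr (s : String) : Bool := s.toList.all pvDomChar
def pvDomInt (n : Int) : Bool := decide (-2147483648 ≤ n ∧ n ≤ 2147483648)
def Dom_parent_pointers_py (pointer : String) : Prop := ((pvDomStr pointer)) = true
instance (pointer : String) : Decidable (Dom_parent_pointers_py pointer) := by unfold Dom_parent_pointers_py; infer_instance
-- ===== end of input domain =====

-- B replaces A's guard plus descending index loop that re-slices and re-joins the parts at every
-- step by a single forward pass with a growing accumulator string, then one reverse (objective:
-- simpler; also avoids the quadratic re-joining, unmeasured here).

-- ===== PORT A =====
def parent_pointers_py (pointer : String) : List String :=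
  if pointer = "" ∨ pointer = "/" then ["/"]
  else
    let parts := ((PySem.Str.split? pointer "/").getD []).filter (fun p => p ≠ "")
    let parents : List String :=
      (PySem.List.pyRange (parts.length : Int) (-1) (-1)).foldl
        (fun parents idx =>
          if idx = 0 then parents ++ ["/"]
          else parents ++ ["/" ++ PySem.Str.join "/" (PySem.List.slice parts none (some idx))])
        []
    parents

-- ===== PORT B =====
def parent_pointers_py_alt (pointer : String) : List String :=
  let st := ((PySem.Str.split? pointer "/").getD []).foldl
    (fun (st : String × List String) part =>
      if part ≠ "" then (st.1 ++ "/" ++ part, st.2 ++ [st.1 ++ "/" ++ part]) else st)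
    ("", [])
  st.2.reverse ++ ["/"]

-- ===== PRECONDITION & SPEC =====
def Spec_parent_pointers_py (pointer : String) (out : List String) : Prop := out = parent_pointers_py_alt pointer
instance (pointer : String) (out : List String) : Decidable (Spec_parent_pointers_py pointer out) := by unfold Spec_parent_pointers_py; infer_instance

-- ===== CLAIM (what is proved, stated in full; the proofs are below) =====
def Claim_equal_parent_pointers_py : Prop := ∀ (pointer : String), Dom_parent_pointers_py pointer → Spec_parent_pointers_py pointer (parent_pointers_py pointer)

-- ===== LEMMAS AND PROOFS =====

/-- The ancestor chain grown forward from accumulator `c`. -/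
def pvChain (c : String) : List String → List String
  | [] => []
  | p :: ps => (c ++ "/" ++ p) :: pvChain (c ++ "/" ++ p) ps

theorem pvJoin_singleton (p : String) : PySem.Str.join "/" [p] = p := by
  rw [← String.toList_inj]; simp [PySem.Str.toList_join, PySem.Chars.join_singleton]

theorem pvJoin_cons (p : String) (l : List String) (h : l ≠ []) :
    PySem.Str.join "/" (p :: l) = p ++ "/" ++ PySem.Str.join "/" l := by
  cases l with
  | nil => exact absurd rfl h
  | cons q rest =>
    rw [← String.toList_inj]
    simp [PySem.Str.toList_join, PySem.Chars.join_cons_cons]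

theorem pvChain_eq (parts : List String) : ∀ c : String,
    pvChain c parts =
      (List.range parts.length).map
        (fun k => c ++ "/" ++ PySem.Str.join "/" (parts.take (k + 1))) := by
  induction parts with
  | nil => intro c; simp [pvChain]
  | cons p ps ih =>
    intro c
    simp only [pvChain, List.length_cons, List.range_succ_eq_map, List.map_cons, List.map_map]
    refine List.cons_eq_cons.mpr ⟨?_, ?_⟩
    · simp [pvJoin_singleton]
    · rw [ih (c ++ "/" ++ p)]
      refine List.map_congr_left ?_
      intro k hk
      simp only [List.mem_range] at hk
      have htake : (p :: ps).take (Nat.succ k + 1) = p :: ps.take (k + 1) := by simp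
      have hne : ps.take (k + 1) ≠ [] := by
        have : (ps.take (k + 1)).length = min (k + 1) ps.length := List.length_take ..
        intro hnil
        rw [hnil] at this
        simp at this
        omega
      simp only [Function.comp, htake, pvJoin_cons p _ hne, String.append_assoc]

theorem pvFoldB (parts : List String) : ∀ (c : String) (acc : List String),
    (parts.foldl
      (fun (st : String × List String) p => (st.1 ++ "/" ++ p, st.2 ++ [st.1 ++ "/" ++ p]))
      (c, acc)).2 = acc ++ pvChain c parts := by
  induction parts with
  | nil => intro c acc; simp [pvChain]
  | cons p ps ih =>
    intro c acc
    simp only [List.foldl_cons, pvChain]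
    rw [ih]
    simp

theorem pvFoldA (g : Int → String) : ∀ (l : List Int) (acc : List String),
    l.foldl
      (fun acc idx => if idx = 0 then acc ++ ["/"] else acc ++ [g idx]) acc
      = acc ++ l.map (fun idx => if idx = 0 then "/" else g idx) := by
  intro l
  induction l with
  | nil => intro acc; simp
  | cons x xs ih =>
    intro acc
    simp only [List.foldl_cons, List.map_cons, ih]
    split_ifs <;> simp

theorem pvFoldFilter : ∀ (raw : List String) (st : String × List String),
    raw.foldl
      (fun (st : String × List String) part =>
        if part ≠ "" then (st.1 ++ "/" ++ part, st.2 ++ [st.1 ++ "/" ++ part]) else st) st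
      = (raw.filter (fun p => p ≠ "")).foldl
          (fun (st : String × List String) part =>
            (st.1 ++ "/" ++ part, st.2 ++ [st.1 ++ "/" ++ part])) st := by
  intro raw
  induction raw with
  | nil => intro st; rfl
  | cons p ps ih =>
    intro st
    rw [List.foldl_cons, List.filter_cons]
    by_cases h : p = ""
    · rw [if_neg (by simp [h]), if_neg (by simp [h])]
      exact ih st
    · rw [if_pos h, if_pos (by simp [h]), List.foldl_cons]
      exact ih _

theorem pv_empty_append (s : String) : "" ++ s = s := by
  rw [← String.toList_inj]; simp

-- ===== VERDICT (by name: the statement is the Claim_ definition above) =====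
theorem parent_pointers_py_spec : Claim_equal_parent_pointers_py := by
  unfold Claim_equal_parent_pointers_py
  intro pointer _
  unfold Spec_parent_pointers_py
  by_cases h0 : pointer = "" ∨ pointer = "/"
  · rcases h0 with h | h <;> subst h <;> decide
  · rw [parent_pointers_py, if_neg h0, parent_pointers_py_alt]
    set raw : List String := (PySem.Str.split? pointer "/").getD [] with hraw
    set parts : List String := raw.filter (fun p => p ≠ "") with hparts
    -- B's guarded fold over raw is the plain fold over the filtered list
    have hB : (raw.foldl
        (fun (st : String × List String) part =>
          if part ≠ "" then (st.1 ++ "/" ++ part, st.2 ++ [st.1 ++ "/" ++ part]) else st)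
        ("", [])).2
        = pvChain "" parts := by
      rw [hparts, pvFoldFilter, pvFoldB]; simp
    rw [hB]
    dsimp only
    rw [PySem.List.pyRange_neg_one_eq_reverse,
      (by norm_num : (-1 : Int) + 1 = 0)]
    rw [pvFoldA, List.nil_append, List.map_reverse,
      PySem.List.pyRange_one_cons (by omega : (0:Int) < (parts.length : Int) + 1)]
    simp only [List.map_cons, List.reverse_cons]
    congr 1
    congr 1
    rw [PySem.List.pyRange_one, pvChain_eq, List.map_map]
    have hlen : ((parts.length : Int) + 1 - (0 + 1)).toNat = parts.length := by omega
    rw [hlen]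
    apply List.map_congr_left
    intro k hk
    have h1 : ((0:Int) + 1 + (k : Int)) ≠ 0 := by omega
    have h2 : (0:Int) ≤ 0 + 1 + (k : Int) := by omega
    simp only [Function.comp, if_neg h1, PySem.List.slice_to parts h2, pv_empty_append]
    have : ((0:Int) + 1 + (k : Int)).toNat = k + 1 := by omega
    rw [this]
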